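-- pv_equiv track=rewrite | github.com/MetaGLM/FinGLM | code/随便取个名/preprocess_data/transfer_file.py | clearexcel
-- ===== SOURCE A (Python) =====
-- def clearexcel(list, word):
--     flag = 0
--     for it in list:
--         if it == '':
--             continue
--         elif word in it:
--             flag = 1
--         elif flag == 1 and it != '）':
--             return it
--     return ''
-- ===== SOURCE B (Python) =====
-- def clearexcel(list, word):
--     items = [x for x in list if x != '']
--     hit = next((i for i, x in enumerate(items) if word in x), None)
--     if hit is None:
--         return ''
--     cands = [x for x in items[hit + 1:] if word not in x and x != '）']
--     return cands[0] if cands else ''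
-- ===== Notes on version B (the rewrite author's own statement) =====
-- stated objective: alternative
-- what changed: Replaces A's flag-driven single scan by a declarative pipeline: filter out empties, find the index of the first item containing word, slice the suffix after it, filter it to items not containing word and not equal to '）', and return the head of that list (or '').
import Mathlib
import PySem

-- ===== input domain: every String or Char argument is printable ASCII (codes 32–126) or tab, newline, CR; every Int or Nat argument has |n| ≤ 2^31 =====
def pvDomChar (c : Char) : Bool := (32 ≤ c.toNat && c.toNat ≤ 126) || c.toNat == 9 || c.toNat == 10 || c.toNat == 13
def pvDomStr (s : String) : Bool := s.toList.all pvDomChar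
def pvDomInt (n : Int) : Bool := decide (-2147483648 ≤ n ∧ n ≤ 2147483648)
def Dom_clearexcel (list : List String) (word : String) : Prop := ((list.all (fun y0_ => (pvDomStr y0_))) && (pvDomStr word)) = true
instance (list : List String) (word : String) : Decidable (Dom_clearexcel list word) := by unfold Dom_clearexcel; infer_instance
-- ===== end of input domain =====

-- B replaces A's flag-driven scan by a filter/findIdx?/slice/filter/head pipeline (return value only).

-- ===== PORT A =====
-- one pass with a mutable flag, transliterated as recursion over the list carrying flag
def clearexcelAux (word : String) : List String → Int → String
  | [], _ => ""
  | it :: rest, flag =>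
    if it = "" then clearexcelAux word rest flag
    else if PySem.Chars.isIn word.toList it.toList then clearexcelAux word rest 1
    else if flag = 1 ∧ it ≠ "）" then it
    else clearexcelAux word rest flag

def clearexcel (list : List String) (word : String) : String :=
  clearexcelAux word list 0

-- ===== PORT B =====
-- items = [x for x in list if x != '']; hit = first index of an item containing word;
-- cands = filtered suffix after the hit; return its head or ''
def clearexcel_alt (list : List String) (word : String) : String :=
  let items := list.filter (fun x => x ≠ "")
  match items.findIdx? (fun x => PySem.Chars.isIn word.toList x.toList) with
  | none => ""
  | some hit =>
    let cands := (items.drop (hit + 1)).filter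
      (fun x => !PySem.Chars.isIn word.toList x.toList && x ≠ "）")
    cands.headD ""

-- ===== PRECONDITION & SPEC =====
def Spec_clearexcel (list : List String) (word : String) (out : String) : Prop := out = clearexcel_alt list word
instance (list : List String) (word : String) (out : String) : Decidable (Spec_clearexcel list word out) := by unfold Spec_clearexcel; infer_instance

-- ===== CLAIM (what is proved, stated in full; the proofs are below) =====
def Claim_equal_clearexcel : Prop := ∀ (list : List String) (word : String), Dom_clearexcel list word → Spec_clearexcel list word (clearexcel list word)

-- ===== LEMMAS AND PROOFS =====
theorem aux_one_eq_filter_head (word : String) (l : List String) :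
    clearexcelAux word l 1 =
      (l.filter (fun x =>
        (!PySem.Chars.isIn word.toList x.toList && decide (x ≠ "）")) && decide (x ≠ ""))).headD "" := by
  induction l with
  | nil => rfl
  | cons x rest ih =>
    simp only [clearexcelAux, List.filter_cons]
    by_cases h1 : x = "" <;> by_cases h2 : PySem.Chars.isIn word.toList x.toList = true <;>
      by_cases h3 : x = "）" <;> simp [h1, h2, h3, ih]

theorem aux_zero_eq_alt (word : String) (l : List String) :
    clearexcelAux word l 0 = clearexcel_alt l word := by
  induction l with
  | nil => rfl
  | cons x rest ih =>
    by_cases h1 : x = ""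
    · simp only [clearexcelAux, h1, if_true, ih]
      simp [clearexcel_alt]
    · by_cases h2 : PySem.Chars.isIn word.toList x.toList = true
      · simp [clearexcelAux, clearexcel_alt, List.findIdx?_cons, h1, h2,
          aux_one_eq_filter_head, List.filter_filter]
      · simp only [clearexcelAux, h1, h2, if_false, Bool.false_eq_true,
          zero_ne_one, false_and, ih]
        unfold clearexcel_alt
        simp only [List.filter_cons, h1, List.findIdx?_cons, h2, decide_true,
          ne_eq, not_false_eq_true, if_true, Bool.false_eq_true, if_false]
        cases h : List.findIdx? (fun x => PySem.Chars.isIn word.toList x.toList)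
            (rest.filter (fun x => decide ¬x = "")) <;>
          simp [List.drop_succ_cons]

-- ===== VERDICT (by name: the statement is the Claim_ definition above) =====
theorem clearexcel_spec : Claim_equal_clearexcel := by
  intro list word _
  unfold Spec_clearexcel clearexcel
  exact aux_zero_eq_alt word list
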